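-- pv_equiv track=rewrite | github.com/josiasbruderer/bbs-for-independence | 03_workspace/modules/wrangler.py | daterange
-- ===== SOURCE A (Python) =====
-- def daterange(lst, t="r"):
--     ltmp = []
--     ltmp2 = []
--     if len(lst) > 0:
--         for l in lst:
--             ltmp += list(filter(None, l))
--         for l in ltmp:
--             if len(l) == 2:
--                 ltmp2 += ["19" + l]
--             else:
--                 ltmp2 += [l]
--         if len(ltmp2) > 2:
--             if t == "e":
--                 return str(min(ltmp2))
--             elif t == "l":
--                 return str(max(ltmp2))
--             else:
--                 return str(min(ltmp2) + "-" + max(ltmp2))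
--         else:
--             return str(ltmp2[0])
--     else:
--         return "nd."
-- ===== SOURCE B (Python) =====
-- def daterange(lst, t="r"):
--     # One streaming pass: running min/max/count and the first normalized element,
--     # instead of building two intermediate lists and calling min()/max().
--     if not lst:
--         return "nd."
--     count = 0
--     first = mn = mx = None
--     for l in lst:
--         for x in l:
--             if x:
--                 v = "19" + x if len(x) == 2 else x
--                 if count == 0:
--                     first = mn = mx = v
--                 else:
--                     if v < mn:
--                         mn = v
--                     if v > mx:
--                         mx = v
--                 count += 1
--     if count > 2:
--         if t == "e":
--             return mn
--         if t == "l":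
--             return mx
--         return mn + "-" + mx
--     return first
-- ===== Notes on version B (the rewrite author's own statement) =====
-- stated objective: alternative
-- what changed: B does one streaming pass over the nested list keeping a running minimum, running maximum, element count and the first normalized element, instead of A's three phases (flatten+filter into one list, normalize into a second list, then separate min()/max() calls); Pre_ excludes only non-empty inputs whose elements are all falsy, where A raises IndexError.
import Mathlib
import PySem

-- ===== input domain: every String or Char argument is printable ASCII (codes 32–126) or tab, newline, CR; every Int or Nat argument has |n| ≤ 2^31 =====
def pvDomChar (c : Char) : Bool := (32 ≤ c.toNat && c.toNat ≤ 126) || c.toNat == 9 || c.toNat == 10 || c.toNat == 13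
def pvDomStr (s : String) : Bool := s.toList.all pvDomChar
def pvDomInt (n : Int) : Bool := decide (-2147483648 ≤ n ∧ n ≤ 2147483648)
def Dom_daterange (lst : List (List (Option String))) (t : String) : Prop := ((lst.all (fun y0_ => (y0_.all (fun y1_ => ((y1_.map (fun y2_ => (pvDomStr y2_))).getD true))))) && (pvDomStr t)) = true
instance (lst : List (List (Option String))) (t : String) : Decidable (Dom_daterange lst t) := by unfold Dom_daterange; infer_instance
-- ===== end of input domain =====

-- B replaces A's three phases (flatten+filter, normalize, separate min()/max()) by one streaming
-- pass keeping a running min/max, a count and the first normalized element (alternative decomposition, same cost).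


-- ===== PORT A =====
-- list(filter(None, l)) on a list of Optional[str]: keeps the truthy elements (drops None and "")
def pvFilterTruthy (l : List (Option String)) : List String :=
  l.filterMap (fun x => match x with
    | none => none
    | some s => if s = "" then none else some s)

def daterange (lst : List (List (Option String))) (t : String) : String :=
  if lst.length > 0 then
    let ltmp := lst.foldl (fun acc l => acc ++ pvFilterTruthy l) []
    let ltmp2 := ltmp.foldl (fun acc l =>
      if PySem.Str.len l = 2 then acc ++ ["19" ++ l] else acc ++ [l]) []
    if ltmp2.length > 2 then
      if t = "e" then (PySem.List.min? ltmp2 (fun y => y)).getD ""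
      else if t = "l" then (PySem.List.max? ltmp2 (fun y => y)).getD ""
      else ((PySem.List.min? ltmp2 (fun y => y)).getD "") ++ "-" ++ ((PySem.List.max? ltmp2 (fun y => y)).getD "")
    else (PySem.List.pyGet? ltmp2 0).getD ""  -- ltmp2[0]; none = IndexError, excluded by Pre_
  else "nd."

-- ===== PORT B =====
def daterange_alt (lst : List (List (Option String))) (t : String) : String :=
  if lst = [] then "nd."
  else
    let st := lst.foldl (fun st l =>
      l.foldl (fun st x =>
        match x with
        | none => st
        | some s =>
          if s = "" then st
          else
            let v := if PySem.Str.len s = 2 then "19" ++ s else s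
            match st with
            | (none, c) => (some (v, v, v), c + 1)
            | (some (mn, mx, f), c) =>
              (some (if v < mn then v else mn, if v > mx then v else mx, f), c + 1)) st)
      ((none : Option (String × String × String)), (0 : Nat))
    match st with
    | (some (mn, mx, f), c) =>
      if c > 2 then
        if t = "e" then mn
        else if t = "l" then mx
        else mn ++ "-" ++ mx
      else f
    | (none, _) => ""  -- count = 0: B's Python returns None here; excluded by Pre_

-- ===== PRECONDITION & SPEC =====
-- Pre_ excludes exactly the non-empty inputs whose elements are all falsy (None or ""):
-- there A raises IndexError on ltmp2[0] (and B's Python returns None, not a str).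
def Pre_daterange (lst : List (List (Option String))) (t : String) : Prop :=
  lst = [] ∨ ∃ l ∈ lst, ∃ x ∈ l, x.getD "" ≠ ""
instance (lst : List (List (Option String))) (t : String) : Decidable (Pre_daterange lst t) := by
  unfold Pre_daterange; infer_instance

def pvWitness_daterange : List (List (Option String)) × String := ([[some "20", none], [some "1999", some ""]], "r")

def Spec_daterange (lst : List (List (Option String))) (t : String) (out : String) : Prop := out = daterange_alt lst t
instance (lst : List (List (Option String))) (t : String) (out : String) : Decidable (Spec_daterange lst t out) := by unfold Spec_daterange; infer_instance

-- ===== CLAIM (what is proved, stated in full; the proofs are below) =====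
def Claim_equal_daterange : Prop := ∀ (lst : List (List (Option String))) (t : String), Dom_daterange lst t → Pre_daterange lst t → Spec_daterange lst t (daterange lst t)

-- ===== LEMMAS AND PROOFS =====

-- proof-only helpers
def pvNorm (s : String) : String := if PySem.Str.len s = 2 then "19" ++ s else s

def pvStep (st : Option (String × String × String) × Nat) (v : String) :
    Option (String × String × String) × Nat :=
  match st with
  | (none, c) => (some (v, v, v), c + 1)
  | (some (mn, mx, f), c) =>
    (some (if v < mn then v else mn, if v > mx then v else mx, f), c + 1)

theorem pv_if_min (a v : String) : (if v < a then v else a) = min a v := by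
  rcases le_or_gt a v with h | h
  · simp [min_def, h, not_lt.mpr h]
  · simp [min_def, not_le.mpr h, h]

theorem pv_if_max (a v : String) : (if v > a then v else a) = max a v := by
  rcases lt_or_ge a v with h | h
  · simp [max_def, le_of_lt h, h]
  · have : ¬ (a < v) := not_lt.mpr h
    by_cases h2 : a ≤ v
    · have : a = v := le_antisymm h2 h
      subst this; simp [max_def]
    · simp [max_def, h2, this]

-- B's inner loop over one sublist = pvStep folded over the filtered+normalized sublist
theorem pv_inner (l : List (Option String)) (st : Option (String × String × String) × Nat) :
    l.foldl (fun st x =>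
      match x with
      | none => st
      | some s =>
        if s = "" then st
        else
          let v := if PySem.Str.len s = 2 then "19" ++ s else s
          match st with
          | (none, c) => (some (v, v, v), c + 1)
          | (some (mn, mx, f), c) =>
            (some (if v < mn then v else mn, if v > mx then v else mx, f), c + 1)) st
    = ((pvFilterTruthy l).map pvNorm).foldl pvStep st := by
  induction l generalizing st with
  | nil => rfl
  | cons x tl ih =>
    cases x with
    | none => simpa [pvFilterTruthy] using ih st
    | some s =>
      by_cases hs : s = ""
      · simpa [pvFilterTruthy, hs] using ih st
      · have ih' := ih (pvStep st (pvNorm s))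
        simp only [pvFilterTruthy] at ih' ⊢
        simp only [List.foldl_cons, List.filterMap_cons, hs, ite_false, List.map_cons]
        rw [← ih']
        congr 1

-- running pvStep from a seeded state
theorem pv_run (tl : List String) (mn mx f : String) (c : Nat) :
    tl.foldl pvStep (some (mn, mx, f), c)
      = (some (tl.foldl (fun a v => if v < a then v else a) mn,
               tl.foldl (fun a v => if v > a then v else a) mx, f), c + tl.length) := by
  induction tl generalizing mn mx c with
  | nil => simp
  | cons v tl ih =>
    simp only [List.foldl_cons, pvStep, ih, List.length_cons]
    congr 1
    omega

theorem pv_foldl_norm (ltmp : List String) (acc : List String) :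
    ltmp.foldl (fun acc l =>
      if PySem.Str.len l = 2 then acc ++ ["19" ++ l] else acc ++ [l]) acc
    = acc ++ ltmp.map pvNorm := by
  rw [show (fun (acc : List String) l =>
        if PySem.Str.len l = 2 then acc ++ ["19" ++ l] else acc ++ [l])
      = fun acc l => acc ++ [pvNorm l] from by
    funext acc l
    by_cases h : PySem.Str.len l = 2
    · rw [pvNorm, if_pos h, if_pos h]
    · rw [pvNorm, if_neg h, if_neg h]]
  exact PySem.List.foldl_append_singleton_eq_map pvNorm ltmp acc

-- ===== VERDICT (by name: the statement is the Claim_ definition above) =====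
theorem daterange_spec : Claim_equal_daterange := by
  intro lst t _ hpre
  unfold Spec_daterange
  by_cases hnil : lst = []
  · subst hnil; rfl
  rcases hpre with h | ⟨l, hl, x, hx, hxv⟩
  · exact absurd h hnil
  obtain ⟨s, rfl⟩ : ∃ s, x = some s := by
    cases x with
    | none => simp at hxv
    | some s => exact ⟨s, rfl⟩
  have hs : s ≠ "" := by simpa using hxv
  -- the flattened, filtered, normalized list both programs effectively traverse
  have hsf : s ∈ pvFilterTruthy l := by
    unfold pvFilterTruthy
    exact List.mem_filterMap.mpr ⟨some s, hx, by simp [hs]⟩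
  have hsmem : pvNorm s ∈ lst.flatMap (fun l => (pvFilterTruthy l).map pvNorm) :=
    List.mem_flatMap.mpr ⟨l, hl, List.mem_map.mpr ⟨s, hsf, rfl⟩⟩
  have hLne : lst.flatMap (fun l => (pvFilterTruthy l).map pvNorm) ≠ [] := by
    intro h; rw [h] at hsmem; simp at hsmem
  obtain ⟨h0, tl, hL⟩ := List.exists_cons_of_ne_nil hLne
  -- A in closed form over that list
  have hlen : lst.length > 0 := by
    cases lst with | nil => exact absurd rfl hnil | cons a b => simp
  have hA : daterange lst t =
      (if (h0 :: tl).length > 2 then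
        if t = "e" then (PySem.List.min? (h0 :: tl) (fun y => y)).getD ""
        else if t = "l" then (PySem.List.max? (h0 :: tl) (fun y => y)).getD ""
        else ((PySem.List.min? (h0 :: tl) (fun y => y)).getD "") ++ "-" ++
             ((PySem.List.max? (h0 :: tl) (fun y => y)).getD "")
      else (PySem.List.pyGet? (h0 :: tl) 0).getD "") := by
    simp only [daterange, if_pos hlen, PySem.List.foldl_append_eq_flatMap,
      List.nil_append, pv_foldl_norm, List.map_flatMap, hL]
  -- B in closed form over the same list
  have hB : daterange_alt lst t =
      (if 1 + tl.length > 2 then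
        if t = "e" then tl.foldl (fun a v => if v < a then v else a) h0
        else if t = "l" then tl.foldl (fun a v => if v > a then v else a) h0
        else (tl.foldl (fun a v => if v < a then v else a) h0) ++ "-" ++
             (tl.foldl (fun a v => if v > a then v else a) h0)
      else h0) := by
    unfold daterange_alt
    rw [if_neg hnil]
    rw [show (fun (st : Option (String × String × String) × Nat)
              (l : List (Option String)) =>
          l.foldl (fun st x =>
            match x with
            | none => st
            | some s =>
              if s = "" then st
              else
                let v := if PySem.Str.len s = 2 then "19" ++ s else s
                match st with
                | (none, c) => (some (v, v, v), c + 1)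
                | (some (mn, mx, f), c) =>
                  (some (if v < mn then v else mn, if v > mx then v else mx, f), c + 1)) st)
        = fun st l => ((pvFilterTruthy l).map pvNorm).foldl pvStep st from by
      funext st l; exact pv_inner l st]
    rw [← List.foldl_flatMap, hL, List.foldl_cons]
    rw [show pvStep ((none : Option (String × String × String)), (0 : Nat)) h0
          = (some (h0, h0, h0), 1) from rfl]
    rw [pv_run]
  rw [hA, hB]
  have hmin : tl.foldl (fun a v => if v < a then v else a) h0 = tl.foldl min h0 :=
    PySem.List.foldl_congr_mem tl _ _ h0 (fun a v _ => pv_if_min a v)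
  have hmax : tl.foldl (fun a v => if v > a then v else a) h0 = tl.foldl max h0 :=
    PySem.List.foldl_congr_mem tl _ _ h0 (fun a v _ => pv_if_max a v)
  have hget : (PySem.List.pyGet? (h0 :: tl) 0).getD "" = h0 := by
    simp [PySem.List.pyGet?, PySem.List.pyIdx?]
  rw [PySem.List.min?_id_cons, PySem.List.max?_id_cons, hget, hmin, hmax]
  simp only [Option.getD_some, List.length_cons]
  split_ifs <;> first | rfl | omega
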